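-- pv_equiv track=rewrite | github.com/AlexeiVartoumian/algorithmicProblems | HackerRank/array/cheifHopper.py | chiefHopper
-- ===== SOURCE A (Python) =====
-- def chiefHopper(arr):
--     # Write your code here
--     double = 2
--     prev = double
--     def delta(E,height, greaterThan):
--         if greaterThan:
--             return height - E
--         else:
--             return E- height
--     def ispossible(E):
--         for i in range(len(arr)):
--             if arr[i] > E:
--                 E -= delta(E,arr[i],True)
--                 if E <0:
--                     return False
--             elif arr[i] < E:
--                 E += delta(E,arr[i],False)
--                 if E< 0:
--                     return False
--         return True
--     def binsearch(low,high):
--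
--         while low<=high :
--             mid = int((low+high)/2)
--             val = ispossible(mid)
--             lowerval = ispossible(mid-1)
--             if val and not lowerval:
--                return mid
--
--             if not val:
--                 low = mid+1
--             else:
--                 high = mid
--     notFound = True
--     while notFound:
--         if ispossible(double):
--             return binsearch(prev,double)
--         else:
--             prev = double
--             double*=2
-- ===== SOURCE B (Python) =====
-- def chiefHopper(arr):
--     # Backward single pass: the minimal energy needed before a jump of height h,
--     # given that e is needed afterwards, is ceil((h + e) / 2), clamped at 0.
--     e = 0
--     for h in reversed(arr):
--         e = max((h + e + 1) // 2, 0)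
--     return e
-- ===== Notes on version B (the rewrite author's own statement) =====
-- stated objective: faster
-- what changed: A binary-searches the starting energy, re-simulating all jumps for each probe (and diverges when the answer is <= 1); B computes the minimum directly with one backward pass e = max(ceil((h+e)/2), 0).
-- outside the precondition, e.g. on chiefHopper([]): A does not finish within the time limit, B returns 0; on chiefHopper([1]): A does not finish within the time limit, B returns 1; on chiefHopper([2]): A does not finish within the time limit, B returns 1
import Mathlib
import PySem

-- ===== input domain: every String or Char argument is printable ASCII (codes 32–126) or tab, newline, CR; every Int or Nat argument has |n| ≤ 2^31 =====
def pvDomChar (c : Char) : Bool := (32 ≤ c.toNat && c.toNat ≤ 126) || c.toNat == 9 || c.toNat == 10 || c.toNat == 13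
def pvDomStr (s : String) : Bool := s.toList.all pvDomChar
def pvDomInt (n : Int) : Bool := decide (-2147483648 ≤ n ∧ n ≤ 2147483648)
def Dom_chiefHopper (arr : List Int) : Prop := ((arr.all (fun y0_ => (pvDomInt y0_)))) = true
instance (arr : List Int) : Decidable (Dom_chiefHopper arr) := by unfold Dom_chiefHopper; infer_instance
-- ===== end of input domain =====

-- B replaces A's binary search (which probes candidate energies, replaying all jumps per probe)
-- by one backward pass e := max(ceil((h+e)/2), 0); equivalence is about the return value only.

-- ===== PORT A =====
-- A's inner 'ispossible(E)': loop over arr; 'delta(E,h,True)' = h - E and 'delta(E,h,False)' = E - h are inlined.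
def pvIsPossible : Int → List Int → Bool
  | _, [] => true
  | e, h :: t =>
    if h > e then
      if e - (h - e) < 0 then false else pvIsPossible (e - (h - e)) t
    else if h < e then
      if e + (e - h) < 0 then false else pvIsPossible (e + (e - h)) t
    else pvIsPossible e t

-- A's 'binsearch(low, high)': the while loop becomes fuel recursion; 'none' = fuel ran out or the
-- loop fell through (Python returns None there).  Python's 'mid = int((low+high)/2)' is floor
-- division here: on every input admitted by Pre_ the operands are positive and < 2^53, where
-- CPython's float division followed by int() is exactly the floor.
def pvBinsearch (arr : List Int) : Int → Int → Nat → Option Int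
  | _, _, 0 => none
  | low, high, fuel + 1 =>
    if low ≤ high then
      let mid := PySem.Int.floordiv (low + high) 2
      let val := pvIsPossible mid arr
      let lowerval := pvIsPossible (mid - 1) arr
      if val && !lowerval then some mid
      else if !val then pvBinsearch arr (mid + 1) high fuel
      else pvBinsearch arr low mid fuel
    else none

-- A's outer 'while notFound' doubling loop, again as fuel recursion.
def pvDoubling (arr : List Int) : Int → Int → Nat → Option Int
  | _, _, 0 => none
  | prev, double, fuel + 1 =>
    if pvIsPossible double arr then pvBinsearch arr prev double 64
    else pvDoubling arr double (double * 2) fuel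

-- Fuel 65 / 64 is proved sufficient on Pre_ below; '.getD 0' is unreachable on Pre_
-- (outside Pre_ the Python loops forever, so nothing is claimed there).
def chiefHopper (arr : List Int) : Int := (pvDoubling arr 2 2 65).getD 0

-- ===== PORT B =====
def chiefHopper_alt (arr : List Int) : Int :=
  arr.reverse.foldl (fun e h => max (PySem.Int.floordiv (h + e + 1) 2) 0) 0

-- ===== PRECONDITION & SPEC =====
-- pvS l k = Σ_{j<k} 2^(k-1-j) · l[j], the forward energy deficit after k jumps started from E:
-- the energy after k jumps from start E is exactly 2^k·E − pvS l k.
def pvS (l : List Int) (k : Nat) : Int :=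
  ((List.range k).map (fun j => 2 ^ (k - 1 - j) * l.getD j 0)).sum

-- Pre_ excludes exactly the inputs whose minimal required starting energy is ≤ 1 (equivalently,
-- starting energy 1 already survives every prefix): there A's binary search loops forever
-- (it can never certify 'ispossible(mid) and not ispossible(mid-1)' with mid ≥ 2), so A returns
-- no value at all, e.g. on [], [1], [2].
def Pre_chiefHopper (arr : List Int) : Prop :=
  ∃ k ∈ List.range (arr.length + 1), (2 : Int) ^ k < pvS arr k
instance (arr : List Int) : Decidable (Pre_chiefHopper arr) := by
  unfold Pre_chiefHopper; infer_instance

def pvWitness_chiefHopper : List Int := [3]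

def Spec_chiefHopper (arr : List Int) (out : Int) : Prop := out = chiefHopper_alt arr
instance (arr : List Int) (out : Int) : Decidable (Spec_chiefHopper arr out) := by
  unfold Spec_chiefHopper; infer_instance

-- ===== CLAIM (what is proved, stated in full; the proofs are below) =====
def Claim_equal_chiefHopper : Prop :=
  ∀ (arr : List Int), Dom_chiefHopper arr → Pre_chiefHopper arr →
    Spec_chiefHopper arr (chiefHopper arr)

-- ===== LEMMAS AND PROOFS =====

-- pvG l = B's fold, written as structural recursion (the minimal sufficient starting energy).
def pvG : List Int → Int
  | [] => 0
  | h :: t => max (PySem.Int.floordiv (h + pvG t + 1) 2) 0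

theorem pvG_eq_alt (arr : List Int) : chiefHopper_alt arr = pvG arr := by
  unfold chiefHopper_alt
  rw [List.foldl_reverse]
  induction arr with
  | nil => rfl
  | cons h t ih => simp only [List.foldr_cons, pvG, ih]

theorem pvG_nonneg (l : List Int) : 0 ≤ pvG l := by
  cases l with
  | nil => simp [pvG]
  | cons h t => simp [pvG]

theorem pvFd2 (x : Int) : PySem.Int.floordiv x 2 = x / 2 :=
  PySem.Int.floordiv_eq_ediv_of_pos (by norm_num)

-- clean forward survival predicate: the energy after a jump of height h is always 2e - h,
-- and a run started at e ≥ 0 survives iff every produced energy stays ≥ 0.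
def pvPoss : Int → List Int → Bool
  | _, [] => true
  | e, h :: t => if 0 ≤ 2 * e - h then pvPoss (2 * e - h) t else false

theorem isPossible_eq_poss (l : List Int) : ∀ e : Int, 0 ≤ e →
    pvIsPossible e l = pvPoss e l := by
  induction l with
  | nil => intro e _; rfl
  | cons h t ih =>
    intro e he
    simp only [pvIsPossible, pvPoss]
    by_cases h1 : h > e
    · simp only [if_pos h1]
      by_cases h2 : e - (h - e) < 0
      · rw [if_pos h2, if_neg (by omega)]
      · rw [if_neg h2, if_pos (by omega), ih _ (by omega),
          show e - (h - e) = 2 * e - h by ring]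
    · simp only [if_neg h1]
      by_cases h3 : h < e
      · simp only [if_pos h3]
        by_cases h2 : e + (e - h) < 0
        · rw [if_pos h2, if_neg (by omega)]
        · rw [if_neg h2, if_pos (by omega), ih _ (by omega),
            show e + (e - h) = 2 * e - h by ring]
      · -- h = e: the Python loop leaves E unchanged (= 2e - h) and checks nothing
        rw [if_neg h3, if_pos (by omega), ih _ he,
          show (2 : Int) * e - h = e by omega]

theorem poss_chara (l : List Int) : ∀ e : Int, 0 ≤ e →
    pvPoss e l = decide (pvG l ≤ e) := by
  induction l with
  | nil =>
    intro e he
    simp [pvPoss, pvG, he]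
  | cons h t ih =>
    intro e he
    have hGt := pvG_nonneg t
    simp only [pvPoss, pvG]
    by_cases h1 : 0 ≤ 2 * e - h
    · rw [if_pos h1, ih _ h1, decide_eq_decide, pvFd2, max_le_iff]
      omega
    · rw [if_neg h1]
      symm
      rw [decide_eq_false_iff_not, pvFd2, max_le_iff]
      omega

theorem pvS_shift (h : Int) (t : List Int) (k : Nat) :
    pvS (h :: t) (k + 1) = 2 ^ k * h + pvS t k := by
  unfold pvS
  rw [List.range_succ_eq_map, List.map_cons, List.sum_cons, List.map_map]
  congr 1
  apply congrArg List.sum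
  apply List.map_congr_left
  intro j _
  simp only [Function.comp_apply, Nat.succ_eq_add_one, List.getD_cons_succ]
  congr 2
  omega

theorem poss_false_iff (l : List Int) : ∀ e : Int, 0 ≤ e →
    (pvPoss e l = false ↔ ∃ k ∈ List.range (l.length + 1), 2 ^ k * e < pvS l k) := by
  induction l with
  | nil =>
    intro e he
    simp [pvPoss, pvS]
    omega
  | cons h t ih =>
    intro e he
    simp only [pvPoss]
    by_cases h1 : 0 ≤ 2 * e - h
    · rw [if_pos h1]
      rw [ih _ h1]
      constructor
      · rintro ⟨k, hk, hlt⟩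
        refine ⟨k + 1, by simp at hk ⊢; omega, ?_⟩
        rw [pvS_shift]
        have hpow : (2 : Int) ^ (k + 1) * e = 2 ^ k * (2 * e - h) + 2 ^ k * h := by ring
        rw [hpow]
        linarith
      · rintro ⟨k, hk, hlt⟩
        cases k with
        | zero =>
          exfalso
          simp [pvS] at hlt
          omega
        | succ m =>
          refine ⟨m, by simp at hk ⊢; omega, ?_⟩
          rw [pvS_shift] at hlt
          have hpow : (2 : Int) ^ (m + 1) * e = 2 ^ m * (2 * e - h) + 2 ^ m * h := by ring
          rw [hpow] at hlt
          linarith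
    · rw [if_neg h1]
      have hex : 2 ^ (1 : Nat) * e < pvS (h :: t) 1 := by
        rw [show (1 : Nat) = 0 + 1 from rfl, pvS_shift]
        simp only [pvS, List.range_zero, List.map_nil, List.sum_nil, pow_zero]
        omega
      simp only [List.mem_range]
      constructor
      · intro _
        exact ⟨1, by simp, hex⟩
      · intro _
        trivial

theorem pre_iff_two_le (arr : List Int) : Pre_chiefHopper arr ↔ 2 ≤ pvG arr := by
  unfold Pre_chiefHopper
  have h1 := poss_false_iff arr 1 (by norm_num)
  have h2 := poss_chara arr 1 (by norm_num)
  constructor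
  · intro hp
    have : pvPoss 1 arr = false := by
      rw [h1]
      rcases hp with ⟨k, hk, hlt⟩
      exact ⟨k, hk, by rw [mul_one]; exact hlt⟩
    rw [h2] at this
    simp at this
    omega
  · intro hG
    have : pvPoss 1 arr = false := by rw [h2]; simp; omega
    rw [h1] at this
    rcases this with ⟨k, hk, hlt⟩
    exact ⟨k, hk, by rw [mul_one] at hlt; exact hlt⟩

theorem pvG_le_bound (l : List Int) (B : Int) (hB : 0 ≤ B) (h : ∀ x ∈ l, x ≤ B) :
    pvG l ≤ B := by
  induction l with
  | nil => simpa [pvG]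
  | cons a t ih =>
    have ha : a ≤ B := h a (by simp)
    have ht : pvG t ≤ B := ih (fun x hx => h x (by simp [hx]))
    simp only [pvG]
    rw [pvFd2]
    omega

-- the binary search returns the minimal sufficient energy, given enough fuel
theorem binsearch_correct (arr : List Int) :
    ∀ (f : Nat) (low high : Int), 2 ≤ low → low ≤ pvG arr → pvG arr ≤ high →
      high - low < 2 ^ f → pvBinsearch arr low high (f + 1) = some (pvG arr) := by
  have hval : ∀ e : Int, 0 ≤ e → pvIsPossible e arr = decide (pvG arr ≤ e) := fun e he => by
    rw [isPossible_eq_poss arr e he, poss_chara arr e he]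
  intro f
  induction f with
  | zero =>
    intro low high hlow hlM hMh hw
    have heq : high = low := by omega
    have hM : pvG arr = low := by omega
    simp only [pvBinsearch]
    rw [if_pos (by omega)]
    have hmid : PySem.Int.floordiv (low + high) 2 = low := by rw [pvFd2]; omega
    rw [hmid, hval low (by omega), hval (low - 1) (by omega)]
    simp [hM]
  | succ f ih =>
    intro low high hlow hlM hMh hw
    simp only [pvBinsearch]
    rw [if_pos (by omega)]
    set mid := PySem.Int.floordiv (low + high) 2 with hmiddef
    have hmid : mid = (low + high) / 2 := by rw [hmiddef, pvFd2]
    have hmlow : low ≤ mid := by omega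
    have hmhigh : mid ≤ high := by omega
    rw [hval mid (by omega), hval (mid - 1) (by omega)]
    by_cases hv : pvG arr ≤ mid
    · by_cases hl : pvG arr ≤ mid - 1
      · -- val and lowerval: high := mid
        have hlh : low < high := by omega
        have hmh : mid < high := by omega
        rw [if_neg (by simp [hv, hl]), if_neg (by simp [hv])]
        exact ih low mid hlow hlM hv (by omega)
      · -- val and not lowerval: found
        rw [if_pos (by simp [hv, hl])]
        have : mid = pvG arr := by omega
        rw [this]
    · -- not val: low := mid + 1
      rw [if_neg (by simp [hv]), if_pos (by simp [hv])]
      exact ih (mid + 1) high (by omega) (by omega) hMh (by omega)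

-- the doubling loop finds a feasible upper bound and hands binsearch a valid bracket
theorem doubling_correct (arr : List Int) (hM2 : 2 ≤ pvG arr)
    (hMB : pvG arr ≤ 2147483648) :
    ∀ (f : Nat) (prev double : Int), 2 ≤ prev →
      (prev = 2 ∧ double = 2 ∨ (double = 2 * prev ∧ ¬ (pvG arr ≤ prev))) →
      pvG arr ≤ double * 2 ^ f →
      pvDoubling arr prev double (f + 1) = some (pvG arr) := by
  have hval : ∀ e : Int, 0 ≤ e → pvIsPossible e arr = decide (pvG arr ≤ e) := fun e he => by
    rw [isPossible_eq_poss arr e he, poss_chara arr e he]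
  intro f
  induction f with
  | zero =>
    intro prev double hprev hinv hMd
    simp only [pow_zero, mul_one] at hMd
    have hd2 : 2 ≤ double := by rcases hinv with ⟨_, h⟩ | ⟨h, _⟩ <;> omega
    simp only [pvDoubling]
    rw [hval double (by omega), if_pos (by simp [hMd])]
    have hw : double - prev < 2 ^ 63 := by
      rcases hinv with ⟨h1, h2⟩ | ⟨h1, h2⟩ <;> norm_num <;> omega
    have hlM : prev ≤ pvG arr := by rcases hinv with ⟨h1, _⟩ | ⟨_, h2⟩ <;> omega
    exact binsearch_correct arr 63 prev double hprev hlM hMd hw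
  | succ f ih =>
    intro prev double hprev hinv hMd
    have hd2 : 2 ≤ double := by rcases hinv with ⟨_, h⟩ | ⟨h, _⟩ <;> omega
    simp only [pvDoubling]
    by_cases hp : pvG arr ≤ double
    · rw [hval double (by omega), if_pos (by simp [hp])]
      have hw : double - prev < 2 ^ 63 := by
        rcases hinv with ⟨h1, h2⟩ | ⟨h1, h2⟩ <;> norm_num <;> omega
      have hlM : prev ≤ pvG arr := by rcases hinv with ⟨h1, _⟩ | ⟨_, h2⟩ <;> omega
      exact binsearch_correct arr 63 prev double hprev hlM hp hw
    · rw [hval double (by omega), if_neg (by simp [hp])]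
      refine ih double (double * 2) (by omega) (Or.inr ⟨by ring, hp⟩) ?_
      calc pvG arr ≤ double * 2 ^ (f + 1) := hMd
        _ = double * 2 * 2 ^ f := by ring

-- ===== VERDICT (by name: the statement is the Claim_ definition above) =====
theorem chiefHopper_spec : Claim_equal_chiefHopper := by
  intro arr hdom hpre
  unfold Spec_chiefHopper
  rw [pvG_eq_alt]
  have hM2 : 2 ≤ pvG arr := (pre_iff_two_le arr).mp hpre
  have hMB : pvG arr ≤ 2147483648 := by
    refine pvG_le_bound arr 2147483648 (by norm_num) ?_
    intro x hx
    unfold Dom_chiefHopper at hdom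
    rw [List.all_eq_true] at hdom
    have := hdom x hx
    simp [pvDomInt] at this
    omega
  have h65 : pvDoubling arr 2 2 65 = some (pvG arr) := by
    refine doubling_correct arr hM2 hMB 64 2 2 (by norm_num) (Or.inl ⟨rfl, rfl⟩) ?_
    calc pvG arr ≤ 2147483648 := hMB
      _ ≤ 2 * 2 ^ 64 := by norm_num
  unfold chiefHopper
  rw [h65]
  rfl
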